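-- pv_equiv track=rewrite | github.com/Jesscha/algorithmsolutions | filename.py | fileConverter
-- ===== SOURCE A (Python) =====
-- def fileConverter(file):
--     isStringEnd = False
--     s = ""
--     n = ""
--     for i, v in enumerate(file):
--         if isStringEnd == False:
--             if v.isnumeric():
--                 # n += v
--                 isStringEnd = True
--                 s = file[:i].lower()
--         if isStringEnd == True:
--             if not v.isnumeric():
--                 break
--             n+=v
--     return (s, int(n))
-- ===== SOURCE B (Python) =====
-- def fileConverter(file):
--     # two sequential index scans: find the split point, then the digit run
--     i = 0
--     while i < len(file) and not file[i].isnumeric():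
--         i += 1
--     s = file[:i].lower()
--     j = i
--     while j < len(file) and file[j].isnumeric():
--         j += 1
--     return (s, int(file[i:j]))
-- ===== Notes on version B (the rewrite author's own statement) =====
-- stated objective: simpler
-- what changed: A's single flag-driven loop with a mutable state machine is replaced by two sequential index scans (advance past non-digits, then past digits) and slicing out the digit run.
-- outside the precondition, e.g. on fileConverter(''): A raises ValueError, B raises ValueError
import Mathlib
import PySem

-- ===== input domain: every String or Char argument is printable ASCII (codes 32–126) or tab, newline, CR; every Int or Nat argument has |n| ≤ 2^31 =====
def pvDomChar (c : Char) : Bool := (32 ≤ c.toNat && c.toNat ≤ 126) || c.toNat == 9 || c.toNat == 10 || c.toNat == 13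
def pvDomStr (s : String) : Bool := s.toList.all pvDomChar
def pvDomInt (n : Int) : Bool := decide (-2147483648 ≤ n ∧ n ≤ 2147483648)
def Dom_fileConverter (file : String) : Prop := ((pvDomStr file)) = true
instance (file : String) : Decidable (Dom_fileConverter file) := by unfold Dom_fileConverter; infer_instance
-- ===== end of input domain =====

-- B replaces A's single flag-driven state-machine loop by two sequential index scans; return value only.
-- Python's .isnumeric() is ported as PySem.Chars.isdigit — exact on the ASCII domain Dom_fileConverter.

-- ===== PORT A =====
-- for i, v in enumerate(file): the flag-driven loop, with `break` as an early return of the state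
def fcLoopA (file : List Char) : List Char → Nat → Bool → List Char → List Char → (List Char × List Char)
  | [], _, _, s, n => (s, n)
  | v :: rest, i, e, s, n =>
    -- if isStringEnd == False: if v.isnumeric(): isStringEnd = True; s = file[:i].lower()
    let es : Bool × List Char :=
      if e = false then
        if PySem.Chars.isdigit v then (true, PySem.Chars.lower (PySem.List.slice file none (some (i : Int))))
        else (e, s)
      else (e, s)
    -- if isStringEnd == True: if not v.isnumeric(): break  else n += v
    if es.1 = true then
      if PySem.Chars.isdigit v = false then (es.2, n)
      else fcLoopA file rest (i + 1) es.1 es.2 (n ++ [v])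
    else fcLoopA file rest (i + 1) es.1 es.2 n

def fileConverter (file : String) : String × Int :=
  let cs := file.toList
  let sn := fcLoopA cs cs 0 false [] []
  -- int(n): ValueError (none) is excluded by Pre_fileConverter
  (String.ofList sn.1, (PySem.Int.ofChars? sn.2).getD 0)

-- ===== PORT B =====
-- while i < len(file) and p(file[i]): i += 1   (one scan; used once per phase with its predicate)
def fcScanB (cs : List Char) (p : Char → Bool) (i : Nat) : Nat :=
  if h : i < cs.length then
    if p cs[i] then fcScanB cs p (i + 1) else i
  else i
termination_by cs.length - i

def fileConverter_alt (file : String) : String × Int :=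
  let cs := file.toList
  let i := fcScanB cs (fun c => !PySem.Chars.isdigit c) 0
  let s := PySem.Chars.lower (PySem.List.slice cs none (some (i : Int)))
  let j := fcScanB cs PySem.Chars.isdigit i
  -- int(file[i:j]): ValueError (none) is excluded by Pre_fileConverter
  (String.ofList s, (PySem.Int.ofChars? (PySem.List.slice cs (some (i : Int)) (some (j : Int)))).getD 0)

-- ===== PRECONDITION & SPEC =====
-- Pre_ excludes exactly the strings with no digit, on which A's int("") raises ValueError (B raises there too).
def Pre_fileConverter (file : String) : Prop := file.toList.any PySem.Chars.isdigit = true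
instance (file : String) : Decidable (Pre_fileConverter file) := by unfold Pre_fileConverter; infer_instance
def pvWitness_fileConverter : String := "Ab12cd"

def Spec_fileConverter (file : String) (out : String × Int) : Prop := out = fileConverter_alt file
instance (file : String) (out : String × Int) : Decidable (Spec_fileConverter file out) := by unfold Spec_fileConverter; infer_instance

-- ===== CLAIM (what is proved, stated in full; the proofs are below) =====
def Claim_equal_fileConverter : Prop := ∀ (file : String), Dom_fileConverter file → Pre_fileConverter file → Spec_fileConverter file (fileConverter file)

-- ===== LEMMAS AND PROOFS =====

-- B's scan reaches i plus the length of the run of p-chars starting at i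
theorem fcScanB_eq (cs : List Char) (p : Char → Bool) (i : Nat) :
    fcScanB cs p i = i + ((cs.drop i).takeWhile p).length := by
  rw [fcScanB]
  split
  · next h =>
    have hdrop : cs.drop i = cs[i] :: cs.drop (i + 1) := (List.getElem_cons_drop h).symm
    split
    · next hp =>
      rw [fcScanB_eq cs p (i + 1), hdrop, List.takeWhile_cons, if_pos hp, List.length_cons]
      omega
    · next hp =>
      rw [hdrop, List.takeWhile_cons, if_neg hp, List.length_nil]
      omega
  · next h =>
    rw [List.drop_eq_nil_of_le (by omega)]
    simp
termination_by cs.length - i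

-- l.take (l.takeWhile p).length = l.takeWhile p
theorem take_length_takeWhile {α : Type} (p : α → Bool) (l : List α) :
    l.take (l.takeWhile p).length = l.takeWhile p := by
  induction l with
  | nil => simp
  | cons a t ih =>
    by_cases h : p a = true <;> simp [h, ih]

-- l.drop (l.takeWhile p).length = l.dropWhile p
theorem drop_length_takeWhile {α : Type} (p : α → Bool) (l : List α) :
    l.drop (l.takeWhile p).length = l.dropWhile p := by
  induction l with
  | nil => simp
  | cons a t ih =>
    by_cases h : p a = true <;> simp [h, ih]

-- A's loop once the flag is set: it appends the digit run and stops
theorem fcLoopA_phase2 (file : List Char) (cs : List Char) (i : Nat) (s n : List Char) :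
    fcLoopA file cs i true s n = (s, n ++ cs.takeWhile PySem.Chars.isdigit) := by
  induction cs generalizing i n with
  | nil => simp [fcLoopA]
  | cons v rest ih =>
    by_cases h : PySem.Chars.isdigit v = true
    · simp [fcLoopA, h, ih]
    · simp [fcLoopA, h]

-- A's loop before the flag is set, provided a digit exists in the suffix
theorem fcLoopA_phase1 (file : List Char) (cs : List Char) (i : Nat) (s n : List Char)
    (hd : cs.any PySem.Chars.isdigit = true) :
    fcLoopA file cs i false s n =
      (PySem.Chars.lower (PySem.List.slice file none
          (some ((i + (cs.takeWhile (fun c => !PySem.Chars.isdigit c)).length : Nat) : Int))),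
       n ++ (cs.dropWhile (fun c => !PySem.Chars.isdigit c)).takeWhile PySem.Chars.isdigit) := by
  induction cs generalizing i with
  | nil => simp at hd
  | cons v rest ih =>
    by_cases h : PySem.Chars.isdigit v = true
    · simp [fcLoopA, h, fcLoopA_phase2]
    · have hd' : rest.any PySem.Chars.isdigit = true := by
        simpa [h] using hd
      have harith : i + 1 + (rest.takeWhile (fun c => !PySem.Chars.isdigit c)).length
          = i + ((rest.takeWhile (fun c => !PySem.Chars.isdigit c)).length + 1) := by omega
      simp [fcLoopA, h, ih _ hd', harith]

-- ===== VERDICT (by name: the statement is the Claim_ definition above) =====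
theorem fileConverter_spec : Claim_equal_fileConverter := by
  unfold Claim_equal_fileConverter
  intro file _ hpre
  unfold Spec_fileConverter fileConverter fileConverter_alt
  simp only [fcScanB_eq, fcLoopA_phase1 _ _ _ _ _ hpre]
  simp [drop_length_takeWhile]
  rw [PySem.List.slice_natCast_add, drop_length_takeWhile, take_length_takeWhile]
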